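-- pv_equiv track=rewrite | github.com/subodhstha/Compiler-Design-and-Construction | 10_check_string_within_valid_comment_section_or_not.py | is_within_comment
-- ===== SOURCE A (Python) =====
-- def is_within_comment(code, target_string):
--     in_single_line_comment = False
--     in_multi_line_comment = False
--     target_found = False
--
--     lines = code.split('\n')
--     for line in lines:
--         i = 0
--         while i < len(line):
--             if in_single_line_comment:
--                 if line[i] == '\n':
--                     in_single_line_comment = False
--                 i += 1
--                 continue
--
--             if in_multi_line_comment:
--                 if line[i:i+2] == '*/':
--                     in_multi_line_comment = False
--                     i += 2
--                 else:
--                     i += 1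
--                 continue
--
--             if line[i:i+2] == '//':
--                 in_single_line_comment = True
--                 i += 2
--                 continue
--
--             if line[i:i+2] == '/*':
--                 in_multi_line_comment = True
--                 i += 2
--                 continue
--
--             i += 1
--
--         if in_single_line_comment or in_multi_line_comment:
--             if target_string in line:
--                 target_found = True
--
--     return target_found
-- ===== SOURCE B (Python) =====
-- def is_within_comment(code, target_string):
--     in_single_line_comment = False
--     in_multi_line_comment = False
--     target_found = False
--
--     for line in code.split('\n'):
--         if not in_single_line_comment:
--             i, n = 0, len(line)
--             while i < n:
--                 if in_multi_line_comment:
--                     j = line.find('*/', i)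
--                     if j == -1:
--                         i = n
--                     else:
--                         in_multi_line_comment = False
--                         i = j + 2
--                 else:
--                     j1 = line.find('//', i)
--                     j2 = line.find('/*', i)
--                     if j1 == -1 and j2 == -1:
--                         i = n
--                     elif j2 == -1 or (j1 != -1 and j1 < j2):
--                         in_single_line_comment = True
--                         i = n
--                     else:
--                         in_multi_line_comment = True
--                         i = j2 + 2
--         if in_single_line_comment or in_multi_line_comment:
--             if target_string in line:
--                 target_found = True
--     return target_found
-- ===== Notes on version B (the rewrite author's own statement) =====
-- stated objective: faster
-- what changed: A advances one character at a time through each line with a two-flag FSM; B keeps the flags but jumps with str.find to the next relevant delimiter (the closing '*/' when inside a block comment, otherwise the earlier of '//' and '/*'), skipping a whole line once the single-line flag is set.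
import Mathlib
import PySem

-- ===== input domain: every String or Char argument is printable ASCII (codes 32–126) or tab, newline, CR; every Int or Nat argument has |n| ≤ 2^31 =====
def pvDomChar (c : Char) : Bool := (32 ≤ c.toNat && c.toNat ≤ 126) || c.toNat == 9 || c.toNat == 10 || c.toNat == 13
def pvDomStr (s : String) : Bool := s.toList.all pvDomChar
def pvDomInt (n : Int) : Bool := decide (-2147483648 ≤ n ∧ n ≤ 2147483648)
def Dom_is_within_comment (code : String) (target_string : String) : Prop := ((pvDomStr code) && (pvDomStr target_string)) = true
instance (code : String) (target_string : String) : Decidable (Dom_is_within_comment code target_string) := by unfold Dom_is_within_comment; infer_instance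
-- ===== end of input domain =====

-- B replaces A's per-character two-flag scan with find-based jumps to the next delimiter
-- ('*/' when inside a block comment, else the earlier of '//' and '/*'); objective: faster (constant factor, measured).

-- ===== PORT A =====
-- A's inner while loop over indices i, transcribed as recursion on the suffix line[i:]
-- (line[i:i+2] matching '*/', '//', '/*' looks at the first two characters of the suffix).
def pvAScan : List Char → Bool → Bool → Bool × Bool
  | [], sl, ml => (sl, ml)
  | c :: rest, true, ml => pvAScan rest (if c = '\n' then false else true) ml
  | c :: d :: rest, false, true =>
      if c = '*' ∧ d = '/' then pvAScan rest false false
      else pvAScan (d :: rest) false true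
  | [_], false, true => pvAScan [] false true
  | c :: d :: rest, false, false =>
      if c = '/' ∧ d = '/' then pvAScan rest true false
      else if c = '/' ∧ d = '*' then pvAScan rest false true
      else pvAScan (d :: rest) false false
  | [_], false, false => pvAScan [] false false

-- A's loop body over one line: scan the line, then record the target if a flag is set.
def pvStepA (target : List Char) (st : Bool × Bool × Bool) (line : List Char) : Bool × Bool × Bool :=
  let (sl, ml, found) := st
  let (sl', ml') := pvAScan line sl ml
  (sl', ml', found || ((sl' || ml') && PySem.Chars.isIn target line))

def is_within_comment (code : String) (target_string : String) : Bool :=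
  ((PySem.Chars.splitOn code.toList ['\n']).foldl (pvStepA target_string.toList)
    (false, false, false)).2.2

-- ===== PORT B =====
-- Source B's line.find(pat, i) restricted to the suffix line[i:]: index of the first
-- occurrence of the two-character pattern a,b (none = Python's -1).
def pvFind2 (a b : Char) : List Char → Option Nat
  | c :: d :: rest =>
      if c = a ∧ d = b then some 0
      else (pvFind2 a b (d :: rest)).map (· + 1)
  | _ => none

theorem pvFind2_le {a b : Char} : ∀ {l : List Char} {j : Nat}, pvFind2 a b l = some j → j + 2 ≤ l.length := by
  intro l
  induction l with
  | nil => intro j h; simp [pvFind2] at h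
  | cons c rest ih =>
    intro j h
    rcases rest with _ | ⟨d, rest'⟩
    · simp [pvFind2] at h
    · rw [pvFind2] at h
      split at h
      · cases h; simp
      · rcases hr : pvFind2 a b (d :: rest') with _ | j'
        · rw [hr] at h; simp at h
        · rw [hr] at h
          simp at h
          have := ih hr
          simp at this ⊢
          omega

-- Source B's inner while loop: jump from delimiter to delimiter (called only when sl is false).
def pvBScan (line : List Char) (ml : Bool) : Bool × Bool :=
  if ml then
    match h : pvFind2 '*' '/' line with
    | none => (false, true)
    | some j => pvBScan (line.drop (j + 2)) false
  else
    match h1 : pvFind2 '/' '/' line, h2 : pvFind2 '/' '*' line with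
    | none, none => (false, false)
    | some _, none => (true, false)
    | none, some j2 => pvBScan (line.drop (j2 + 2)) true
    | some j1, some j2 =>
      if j1 < j2 then (true, false) else pvBScan (line.drop (j2 + 2)) true
termination_by line.length
decreasing_by
  · have := pvFind2_le h; simp [List.length_drop]; omega
  · have := pvFind2_le h2; simp [List.length_drop]; omega
  · have := pvFind2_le h2; simp [List.length_drop]; omega

-- Source B's loop body over one line: skip the scan entirely once sl is set.
def pvStepB (target : List Char) (st : Bool × Bool × Bool) (line : List Char) : Bool × Bool × Bool :=
  let (sl, ml, found) := st
  let (sl', ml') := if sl then (sl, ml) else pvBScan line ml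
  (sl', ml', found || ((sl' || ml') && PySem.Chars.isIn target line))

def is_within_comment_alt (code : String) (target_string : String) : Bool :=
  ((PySem.Chars.splitOn code.toList ['\n']).foldl (pvStepB target_string.toList)
    (false, false, false)).2.2

-- ===== PRECONDITION & SPEC =====
def Spec_is_within_comment (code : String) (target_string : String) (out : Bool) : Prop := out = is_within_comment_alt code target_string
instance (code : String) (target_string : String) (out : Bool) : Decidable (Spec_is_within_comment code target_string out) := by unfold Spec_is_within_comment; infer_instance

-- ===== CLAIM (what is proved, stated in full; the proofs are below) =====
def Claim_equal_is_within_comment : Prop := ∀ (code : String) (target_string : String), Dom_is_within_comment code target_string → Spec_is_within_comment code target_string (is_within_comment code target_string)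

-- ===== LEMMAS AND PROOFS =====

-- Once the single-line flag is set, A's scan of a '\n'-free line leaves the state unchanged.
theorem pvAScan_sl {line : List Char} (hnl : '\n' ∉ line) (ml : Bool) :
    pvAScan line true ml = (true, ml) := by
  induction line with
  | nil => simp [pvAScan]
  | cons c rest ih =>
    have hc : c ≠ '\n' := fun h => hnl (h ▸ List.mem_cons_self)
    rw [pvAScan, if_neg hc]
    exact ih (fun h => hnl (List.mem_cons_of_mem _ h))

-- A's scan in multi-line mode equals: jump to the first '*/' (if any), then continue.
theorem pvAScan_ml (line : List Char) :
    pvAScan line false true =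
      (match pvFind2 '*' '/' line with
       | none => (false, true)
       | some j => pvAScan (line.drop (j + 2)) false false) := by
  induction line with
  | nil => simp [pvAScan, pvFind2]
  | cons c rest ih =>
    rcases rest with _ | ⟨d, rest'⟩
    · simp [pvAScan, pvFind2]
    · rw [pvAScan, pvFind2]
      by_cases h : c = '*' ∧ d = '/'
      · rw [if_pos h, if_pos h]
        simp
      · rw [if_neg h, if_neg h, ih]
        rcases hr : pvFind2 '*' '/' (d :: rest') with _ | j
        · simp
        · have heq : j + 1 + 2 = (j + 2) + 1 := by omega
          simp [heq]

-- A's scan in code mode equals: jump to the earlier of '//' and '/*', then act on it.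
theorem pvAScan_code {line : List Char} (hnl : '\n' ∉ line) :
    pvAScan line false false =
      (match pvFind2 '/' '/' line, pvFind2 '/' '*' line with
       | none, none => (false, false)
       | some _, none => (true, false)
       | none, some j2 => pvAScan (line.drop (j2 + 2)) false true
       | some j1, some j2 =>
         if j1 < j2 then (true, false) else pvAScan (line.drop (j2 + 2)) false true) := by
  induction line with
  | nil => simp [pvAScan, pvFind2]
  | cons c rest ih =>
    have hnl' : '\n' ∉ rest := fun h => hnl (List.mem_cons_of_mem _ h)
    rcases rest with _ | ⟨d, rest'⟩
    · simp [pvAScan, pvFind2]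
    · rw [pvAScan]
      by_cases hsl : c = '/' ∧ d = '/'
      · rw [if_pos hsl]
        have hf1 : pvFind2 '/' '/' (c :: d :: rest') = some 0 := by
          rw [pvFind2, if_pos hsl]
        have hrest : '\n' ∉ rest' := fun h => hnl' (List.mem_cons_of_mem _ h)
        rw [pvAScan_sl hrest false, hf1]
        have hf2 : pvFind2 '/' '*' (c :: d :: rest') =
            (pvFind2 '/' '*' (d :: rest')).map (· + 1) := by
          rw [pvFind2, if_neg (by simp [hsl.2])]
        rw [hf2]
        rcases pvFind2 '/' '*' (d :: rest') with _ | j <;> simp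
      · rw [if_neg hsl]
        have hf1 : pvFind2 '/' '/' (c :: d :: rest') =
            (pvFind2 '/' '/' (d :: rest')).map (· + 1) := by
          rw [pvFind2, if_neg hsl]
        by_cases hml : c = '/' ∧ d = '*'
        · rw [if_pos hml]
          have hf2 : pvFind2 '/' '*' (c :: d :: rest') = some 0 := by
            rw [pvFind2, if_pos hml]
          rw [hf1, hf2]
          rcases pvFind2 '/' '/' (d :: rest') with _ | j1 <;> simp
        · rw [if_neg hml, ih hnl']
          have hf2 : pvFind2 '/' '*' (c :: d :: rest') =
              (pvFind2 '/' '*' (d :: rest')).map (· + 1) := by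
            rw [pvFind2, if_neg hml]
          rw [hf1, hf2]
          rcases pvFind2 '/' '/' (d :: rest') with _ | j1 <;>
            rcases pvFind2 '/' '*' (d :: rest') with _ | j2
          · simp
          · have heq : j2 + 1 + 2 = (j2 + 2) + 1 := by omega
            simp [heq]
          · simp
          · simp only [Option.map_some]
            by_cases hlt : j1 < j2
            · rw [if_pos hlt]
              have : j1 + 1 < j2 + 1 := by omega
              simp [this]
            · rw [if_neg hlt]
              have h2 : ¬ (j1 + 1 < j2 + 1) := by omega
              have heq : j2 + 1 + 2 = (j2 + 2) + 1 := by omega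
              simp [h2, heq]

-- With the single-line flag clear, A's scan and B's find-jump scan agree on '\n'-free lines.
theorem pvAScan_eq_pvBScan : ∀ (n : Nat) (line : List Char), line.length ≤ n →
    '\n' ∉ line → ∀ ml, pvAScan line false ml = pvBScan line ml := by
  intro n
  induction n with
  | zero =>
    intro line hlen _ ml
    have : line = [] := List.eq_nil_of_length_eq_zero (Nat.le_zero.mp hlen)
    subst this
    cases ml <;> simp [pvAScan, pvBScan, pvFind2]
  | succ n ih =>
    intro line hlen hnl ml
    have hsub : ∀ k, '\n' ∉ line.drop k := fun k h => hnl (List.mem_of_mem_drop h)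
    cases ml
    · rw [pvAScan_code hnl, pvBScan]
      simp only [if_neg (Bool.false_ne_true)]
      rcases h1 : pvFind2 '/' '/' line with _ | j1 <;>
        rcases h2 : pvFind2 '/' '*' line with _ | j2
      · rfl
      · have hle := pvFind2_le h2
        have : (line.drop (j2 + 2)).length ≤ n := by simp [List.length_drop]; omega
        exact ih _ this (hsub _) true
      · rfl
      · by_cases hlt : j1 < j2
        · simp [hlt]
        · simp only [if_neg hlt]
          have hle := pvFind2_le h2
          have : (line.drop (j2 + 2)).length ≤ n := by simp [List.length_drop]; omega
          exact ih _ this (hsub _) true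
    · rw [pvAScan_ml, pvBScan]
      simp only [if_pos]
      rcases h : pvFind2 '*' '/' line with _ | j
      · rfl
      · have hle := pvFind2_le h
        have : (line.drop (j + 2)).length ≤ n := by simp [List.length_drop]; omega
        exact ih _ this (hsub _) false

-- A's and B's loop bodies agree on '\n'-free lines, from any state.
theorem pvStepA_eq_pvStepB (target : List Char) (st : Bool × Bool × Bool)
    {line : List Char} (hnl : '\n' ∉ line) : pvStepA target st line = pvStepB target st line := by
  obtain ⟨sl, ml, found⟩ := st
  cases sl
  · simp only [pvStepA, pvStepB, Bool.false_eq_true, if_false]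
    rw [pvAScan_eq_pvBScan line.length line le_rfl hnl ml]
  · simp [pvStepA, pvStepB, pvAScan_sl hnl ml]

-- Pieces produced by splitting on the character c never contain c.
theorem pv_splitOn_go_not_mem (c : Char) :
    ∀ (fuel : Nat) (l cur : List Char) (acc : List (List Char)),
      l.length < fuel → c ∉ cur → (∀ p ∈ acc, c ∉ p) →
      ∀ p ∈ PySem.Chars.splitOn.go [c] fuel l cur acc, c ∉ p := by
  intro fuel
  induction fuel with
  | zero => intro l cur acc hlen; omega
  | succ n ih =>
    intro l cur acc hlen hcur hacc p hp
    rcases l with _ | ⟨d, rest⟩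
    · rw [PySem.Chars.splitOn.go] at hp
      · simp only [List.mem_reverse, List.mem_cons] at hp
        rcases hp with h | h
        · subst h; simpa using hcur
        · exact hacc p h
      · omega
    · rw [PySem.Chars.splitOn.go] at hp
      by_cases hpre : [c].isPrefixOf (d :: rest) = true
      · rw [if_pos hpre] at hp
        refine ih _ _ _ (by simp at hlen ⊢; omega) (by simp) ?_ p hp
        intro q hq
        rcases List.mem_cons.mp hq with h | h
        · subst h; simpa using hcur
        · exact hacc q h
      · rw [if_neg hpre] at hp
        have hd : d ≠ c := by
          intro h; subst h
          simp [List.isPrefixOf] at hpre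
        refine ih _ _ _ (by simp at hlen; omega) ?_ hacc p hp
        intro h
        rcases List.mem_cons.mp h with h' | h'
        · exact hd h'.symm
        · exact hcur h'

theorem pv_splitOn_not_mem (c : Char) (s : List Char) :
    ∀ p ∈ PySem.Chars.splitOn s [c], c ∉ p := by
  rw [PySem.Chars.splitOn]
  exact pv_splitOn_go_not_mem c (s.length + 1) s [] [] (by omega) (by simp) (by simp)

-- The two folds agree on any list of '\n'-free lines, from any state.
theorem pv_fold_eq (target : List Char) :
    ∀ (lines : List (List Char)), (∀ l ∈ lines, '\n' ∉ l) →
      ∀ st, lines.foldl (pvStepA target) st = lines.foldl (pvStepB target) st := by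
  intro lines
  induction lines with
  | nil => intro _ st; rfl
  | cons l rest ih =>
    intro h st
    simp only [List.foldl_cons]
    rw [pvStepA_eq_pvStepB target st (h l List.mem_cons_self)]
    exact ih (fun q hq => h q (List.mem_cons_of_mem _ hq)) _

-- ===== VERDICT (by name: the statement is the Claim_ definition above) =====
theorem is_within_comment_spec : Claim_equal_is_within_comment := by
  intro code target_string _
  unfold Spec_is_within_comment is_within_comment is_within_comment_alt
  rw [pv_fold_eq target_string.toList _ (pv_splitOn_not_mem '\n' code.toList)]
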